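-- pv_equiv track=rewrite | github.com/TermLens/TermLens_BE | src/text_splitter.py | _prev_significant_char
-- ===== SOURCE A (Python) =====
-- from typing import List, Optional, Tuple
--
-- def _prev_significant_char(text: str, start: int) -> Tuple[Optional[str], int]:
--     idx = start
--     while idx >= 0:
--         ch = text[idx]
--         if ch.isspace():
--             idx -= 1
--             continue
--         return ch, idx
--     return None, -1
-- ===== SOURCE B (Python) =====
-- def _prev_significant_char(text, start):
--     if start < 0:
--         return None, -1
--     trimmed = text[:start + 1].rstrip()
--     if not trimmed:
--         return None, -1
--     return trimmed[-1], len(trimmed) - 1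
-- ===== Notes on version B (the rewrite author's own statement) =====
-- stated objective: simpler
-- what changed: Replaces the explicit backward character-by-character scan skipping whitespace with a single rstrip of the prefix text[:start+1], reading the answer off the trimmed string's last character and length.
import Mathlib
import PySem

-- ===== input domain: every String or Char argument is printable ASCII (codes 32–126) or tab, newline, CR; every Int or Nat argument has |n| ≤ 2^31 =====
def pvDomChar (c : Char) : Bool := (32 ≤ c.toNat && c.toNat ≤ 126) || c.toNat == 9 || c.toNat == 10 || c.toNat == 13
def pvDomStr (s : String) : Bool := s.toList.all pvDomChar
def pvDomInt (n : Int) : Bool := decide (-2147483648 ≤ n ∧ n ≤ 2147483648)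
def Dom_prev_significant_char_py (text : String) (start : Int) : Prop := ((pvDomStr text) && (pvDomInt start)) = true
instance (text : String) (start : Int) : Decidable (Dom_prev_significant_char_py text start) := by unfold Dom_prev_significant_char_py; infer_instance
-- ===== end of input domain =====

-- B replaces A's backward whitespace-skipping scan by rstrip-ping the prefix text[:start+1]
-- and reading the last character and length of the trimmed prefix (simpler decomposition).


-- ===== PORT A =====
-- the while-loop of A: idx counts down, whitespace is skipped; pyGet? = none is
-- Python's IndexError (excluded by Pre_), the branch value is never claimed about
def pvALoop (cs : List Char) (idx : Int) : Option String × Int :=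
  if 0 ≤ idx then
    match PySem.List.pyGet? cs idx with
    | none => (none, -1)
    | some ch =>
      if PySem.Chars.isspace ch then pvALoop cs (idx - 1)
      else (some (String.ofList [ch]), idx)
  else (none, -1)
termination_by (idx + 1).toNat
decreasing_by omega

def prev_significant_char_py (text : String) (start : Int) : Option String × Int :=
  pvALoop text.toList start

-- ===== PORT B =====
def prev_significant_char_py_alt (text : String) (start : Int) : Option String × Int :=
  if start < 0 then (none, -1)
  else
    let trimmed := PySem.Chars.rstrip (PySem.List.slice text.toList none (some (start + 1)))
    match trimmed.getLast? with
    | none => (none, -1)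
    | some ch => (some (String.ofList [ch]), (trimmed.length : Int) - 1)

-- ===== PRECONDITION & SPEC =====
-- A raises IndexError (text[start]) exactly when start ≥ len(text); Pre_ excludes that.
def Pre_prev_significant_char_py (text : String) (start : Int) : Prop :=
  start < (text.toList.length : Int)
instance (text : String) (start : Int) : Decidable (Pre_prev_significant_char_py text start) := by
  unfold Pre_prev_significant_char_py; infer_instance

def pvWitness_prev_significant_char_py : String × Int := ("a b", 2)

def Spec_prev_significant_char_py (text : String) (start : Int) (out : Option String × Int) : Prop := out = prev_significant_char_py_alt text start
instance (text : String) (start : Int) (out : Option String × Int) : Decidable (Spec_prev_significant_char_py text start out) := by unfold Spec_prev_significant_char_py; infer_instance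

-- ===== CLAIM (what is proved, stated in full; the proofs are below) =====
def Claim_equal_prev_significant_char_py : Prop := ∀ (text : String) (start : Int), Dom_prev_significant_char_py text start → Pre_prev_significant_char_py text start → Spec_prev_significant_char_py text start (prev_significant_char_py text start)

-- ===== LEMMAS AND PROOFS =====

lemma rstrip_append_singleton (xs : List Char) (c : Char) :
    PySem.Chars.rstrip (xs ++ [c]) =
      if PySem.Chars.isspace c then PySem.Chars.rstrip xs else xs ++ [c] := by
  simp [PySem.Chars.rstrip, List.dropWhile]
  split_ifs with h <;> simp [h]

-- B's value read off the rstripped prefix of the first k characters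
def pvRhs (cs : List Char) (k : Nat) : Option String × Int :=
  match (PySem.Chars.rstrip (cs.take k)).getLast? with
  | none => (none, -1)
  | some ch => (some (String.ofList [ch]), ((PySem.Chars.rstrip (cs.take k)).length : Int) - 1)

lemma pvALoop_eq_rhs (cs : List Char) (n : Nat) (h : n < cs.length) :
    pvALoop cs (n : Int) = pvRhs cs (n + 1) := by
  induction n with
  | zero =>
    have h0 : cs[0]? = some cs[0] := List.getElem?_eq_getElem h
    have h0get : PySem.List.pyGet? cs ((0 : Nat) : Int) = some cs[0] := by
      rw [PySem.List.pyGet?_natCast, h0]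
    have ht : cs.take 1 = [] ++ [cs[0]] := by
      simp [List.take_one, List.head?_eq_getElem?, h0]
    rw [pvALoop, if_pos (by norm_num : (0 : Int) ≤ ((0 : Nat) : Int)), h0get]
    rw [pvRhs, ht, rstrip_append_singleton]
    split_ifs with hs
    · rw [pvALoop, if_neg (by norm_num)]
      simp [PySem.Chars.rstrip, hs]
    · simp [hs]
  | succ m ih =>
    rw [pvALoop]
    have h1 : cs[m + 1]? = some cs[m + 1] := List.getElem?_eq_getElem h
    have hc : PySem.List.pyGet? cs ((m : Int) + 1) = some cs[m + 1] := by
      rw [show ((m : Int) + 1) = ((m + 1 : Nat) : Int) by push_cast; ring,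
        PySem.List.pyGet?_natCast, h1]
    have ht : cs.take (m + 1 + 1) = cs.take (m + 1) ++ [cs[m + 1]] := by
      rw [List.take_add_one, h1]; rfl
    have h0le : (0 : Int) ≤ (m : Int) + 1 := by positivity
    push_cast
    rw [if_pos h0le, hc]
    simp only [show ((m : Int) + 1 - 1) = (m : Int) by ring]
    rw [pvRhs, ht, rstrip_append_singleton]
    split_ifs with hs
    · rw [ih (by omega)]; rfl
    · have hlen : (cs.take (m + 1)).length = m + 1 := by
        simp; omega
      rw [List.getLast?_concat]
      simp only [List.length_append, hlen, List.length_cons, List.length_nil]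
      norm_num

-- ===== VERDICT (by name: the statement is the Claim_ definition above) =====
theorem prev_significant_char_py_spec : Claim_equal_prev_significant_char_py := by
  intro text start _ hpre
  unfold Spec_prev_significant_char_py prev_significant_char_py prev_significant_char_py_alt
  by_cases hneg : start < 0
  · rw [pvALoop, if_neg (by omega), if_pos hneg]
  · rw [if_neg hneg]
    have hst : ((start.toNat : Nat) : Int) = start := Int.toNat_of_nonneg (not_lt.mp hneg)
    have hlt : start.toNat < text.toList.length := by
      unfold Pre_prev_significant_char_py at hpre; omega
    rw [← hst, pvALoop_eq_rhs _ _ hlt,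
      show ((start.toNat : Int) + 1) = ((start.toNat + 1 : Nat) : Int) by push_cast; ring,
      PySem.List.slice_to_natCast]
    rfl
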